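-- pv_equiv track=rewrite | github.com/rob256/adventofcode2020 | python3/day_24/day_24_1.py | split_move
-- ===== SOURCE A (Python) =====
-- from typing import Tuple, Iterable, List
--
-- def split_move(move: str) -> Iterable[str]:
--     i = 0
--     while i < len(move):
--         if move[i] in ['n', 's']:
--             yield move[i: i + 2]
--             i += 2
--         else:
--             yield move[i]
--             i += 1
-- ===== SOURCE B (Python) =====
-- import re
--
-- def split_move(move):
--     for m in re.finditer(r'[ns].?|.', move, re.S):
--         yield m.group()
-- ===== Notes on version B (the rewrite author's own statement) =====
-- stated objective: idiomatic
-- what changed: Replaced the manual index-advancing while loop with a regex tokenizer: re.finditer(r'[ns].?|.', move, re.S) matches an n/s plus an optional following character, else a single character.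
import Mathlib
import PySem

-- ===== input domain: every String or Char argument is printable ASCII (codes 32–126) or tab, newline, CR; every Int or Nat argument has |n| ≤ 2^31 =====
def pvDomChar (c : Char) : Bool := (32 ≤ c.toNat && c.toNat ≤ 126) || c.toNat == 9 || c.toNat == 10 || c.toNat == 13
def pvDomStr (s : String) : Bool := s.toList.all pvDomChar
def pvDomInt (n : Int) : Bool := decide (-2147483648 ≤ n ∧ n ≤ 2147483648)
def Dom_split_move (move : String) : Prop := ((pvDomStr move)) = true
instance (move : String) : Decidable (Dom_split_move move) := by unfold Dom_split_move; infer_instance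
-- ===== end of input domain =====

-- B replaces A's manual index-advancing while loop with a regex tokenizer (re.finditer(r'[ns].?|.'), same output, same cost): idiomatic.


-- ===== PORT A =====
-- A's while loop: index i advances by 2 after an 'n'/'s' two-char slice, else by 1 after a single char.
def splitA_loop (cs : List Char) (i : Nat) : List String :=
  if h : i < cs.length then
    if cs[i] = 'n' ∨ cs[i] = 's' then
      String.mk (PySem.List.slice cs (some ((i : Nat) : Int)) (some (((i + 2 : Nat)) : Int)))
        :: splitA_loop cs (i + 2)
    else
      String.mk [cs[i]] :: splitA_loop cs (i + 1)
  else []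
termination_by cs.length - i

def split_move (move : String) : List String := splitA_loop move.toList 0

-- ===== PORT B =====
-- Hand-port of B's regex scan: re.finditer(r'[ns].?|.', move, re.S) consumes, at each position,
-- an n/s plus one optional (any, incl. newline) character, otherwise one single character — exact
-- for this pattern since alternation is ordered and matches never overlap.
def splitB : List Char → List String
  | [] => []
  | c :: d :: rest =>
      if c = 'n' ∨ c = 's' then String.mk [c, d] :: splitB rest
      else String.mk [c] :: splitB (d :: rest)
  | [c] => [String.mk [c]]

def split_move_alt (move : String) : List String := splitB move.toList

-- ===== PRECONDITION & SPEC =====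
def Spec_split_move (move : String) (out : List String) : Prop := out = split_move_alt move
instance (move : String) (out : List String) : Decidable (Spec_split_move move out) := by unfold Spec_split_move; infer_instance

-- ===== CLAIM (what is proved, stated in full; the proofs are below) =====
def Claim_equal_split_move : Prop := ∀ (move : String), Dom_split_move move → Spec_split_move move (split_move move)

-- ===== LEMMAS AND PROOFS =====

theorem splitB_cons_other (c : Char) (tl : List Char) (hc : ¬ (c = 'n' ∨ c = 's')) :
    splitB (c :: tl) = String.mk [c] :: splitB tl := by
  cases tl with
  | nil => simp [splitB]
  | cons d rest => simp [splitB, hc]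

theorem splitA_eq_splitB_drop (n : Nat) :
    ∀ (cs : List Char) (i : Nat), cs.length - i ≤ n → splitA_loop cs i = splitB (cs.drop i) := by
  induction n with
  | zero =>
      intro cs i hle
      have h : ¬ i < cs.length := by omega
      have hnil : cs.drop i = [] := List.drop_eq_nil_of_le (by omega)
      rw [splitA_loop]
      simp [h, hnil, splitB]
  | succ n ih =>
      intro cs i hle
      by_cases h : i < cs.length
      · have hdrop : cs.drop i = cs[i] :: cs.drop (i + 1) := List.drop_eq_getElem_cons h
        rw [splitA_loop]
        by_cases hns : cs[i] = 'n' ∨ cs[i] = 's'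
        · simp only [h, dif_pos, hns, if_pos]
          rw [PySem.List.slice_natCast cs i (i + 2), Nat.add_sub_cancel_left]
          rw [ih cs (i + 2) (by omega), hdrop]
          cases hd : cs.drop (i + 1) with
          | nil =>
              have h1 : cs.length ≤ i + 1 := by
                by_contra hlt
                simp [List.drop_eq_nil_iff] at hd; omega
              have h2 : cs.drop (i + 2) = [] := List.drop_eq_nil_of_le (by omega)
              simp [splitB, h2]
          | cons d rest =>
              have h2 : cs.drop (i + 2) = rest := by
                have : cs.drop (i + 2) = (cs.drop (i + 1)).drop 1 := by
                  rw [List.drop_drop]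
                rw [this, hd]; rfl
              rw [h2]
              simp [splitB, hns]
        · simp only [h, dif_pos, hns, if_neg, not_false_iff]
          rw [ih cs (i + 1) (by omega), hdrop, splitB_cons_other _ _ hns]
      · have hnil : cs.drop i = [] := List.drop_eq_nil_of_le (by omega)
        rw [splitA_loop]
        simp [h, hnil, splitB]

-- ===== VERDICT (by name: the statement is the Claim_ definition above) =====
theorem split_move_spec : Claim_equal_split_move := by
  intro move _
  unfold Spec_split_move split_move split_move_alt
  rw [splitA_eq_splitB_drop move.toList.length move.toList 0 (by omega)]
  rfl
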